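-- pv_equiv track=rewrite | github.com/mgreen89/aoc2019 | aoc/twentytwo.py | polypow
-- ===== SOURCE A (Python) =====
-- def polypow(a, b, power, mod):
--   """
--   Raise a polynomial to a power with a modulus.
--
--   """
--   if power == 0:
--     # End of polypow, return unchanged.
--     return 1, 0
--
--   if power % 2 == 0:
--     # f^2(x) = f(f(x)) = a(ax+b) + b
--     # therefore a -> a^2, b -> ab + b
--     return polypow((a * a) % mod, (a * b + b) % mod, power // 2, mod)
--
--   else:
--     # Odd power.
--     # f(g(x)) = a(cx + d) + b
--     # therefore a -> ac, b -> ad + b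
--     # where g(x) = cx + d
--     c, d = polypow(a, b, power - 1, mod)
--     return (a * c) % mod, (a * d + b) % mod
-- ===== SOURCE B (Python) =====
-- def polypow(a, b, power, mod):
--   """
--   Raise a polynomial to a power with a modulus.
--
--   Iterative exponentiation by squaring: keep a result poly (initially the
--   identity x -> x) and a base poly, compose the base into the result on set
--   bits of the exponent, square the base each round.
--   """
--   if power < 0:
--     raise ValueError("negative power")
--   ra, rb = 1, 0
--   ba, bb = a, b
--   while power > 0:
--     if power % 2 == 1:
--       ra, rb = (ra * ba) % mod, (ra * bb + rb) % mod
--     ba, bb = (ba * ba) % mod, (ba * bb + bb) % mod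
--     power //= 2
--   return ra, rb
-- ===== Notes on version B (the rewrite author's own statement) =====
-- stated objective: alternative
-- what changed: Replaced A's recursive descent on the exponent (even: square-and-recurse, odd: recurse on power-1 then compose) by an iterative bottom-up exponentiation-by-squaring loop that scans the bits of the exponent low-to-high, composing the running base polynomial into an accumulator on set bits.
import Mathlib
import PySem

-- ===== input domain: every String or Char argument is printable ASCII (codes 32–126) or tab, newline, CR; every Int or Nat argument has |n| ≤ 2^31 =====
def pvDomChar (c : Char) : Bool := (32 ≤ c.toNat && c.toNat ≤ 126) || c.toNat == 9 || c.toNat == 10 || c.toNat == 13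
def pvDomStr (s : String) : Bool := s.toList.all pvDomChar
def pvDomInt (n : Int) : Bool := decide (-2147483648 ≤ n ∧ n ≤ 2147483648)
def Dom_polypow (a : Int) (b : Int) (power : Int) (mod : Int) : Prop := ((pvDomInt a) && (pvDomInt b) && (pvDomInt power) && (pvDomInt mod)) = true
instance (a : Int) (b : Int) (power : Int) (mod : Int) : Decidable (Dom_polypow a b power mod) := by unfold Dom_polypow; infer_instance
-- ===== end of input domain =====

-- B replaces A's recursive exponent descent by an iterative low-to-high binary
-- exponentiation-by-squaring loop (alternative decomposition, same asymptotic cost).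


-- ===== PORT A =====
-- Python's 'if power == 0: return 1, 0' is widened to 'power ≤ 0' purely as a
-- totalization guard: on power < 0 the Python recursion never returns
-- (RecursionError), and those inputs are outside Pre_polypow.
def polypow (a : Int) (b : Int) (power : Int) (mod : Int) : Int × Int :=
  if power ≤ 0 then (1, 0)
  else if PySem.Int.mod power 2 = 0 then
    polypow (PySem.Int.mod (a * a) mod) (PySem.Int.mod (a * b + b) mod)
      (PySem.Int.floordiv power 2) mod
  else
    let cd := polypow a b (power - 1) mod
    (PySem.Int.mod (a * cd.1) mod, PySem.Int.mod (a * cd.2 + b) mod)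
termination_by power.toNat
decreasing_by
  · have h2 : PySem.Int.floordiv power 2 = power / 2 :=
      PySem.Int.floordiv_eq_ediv_of_pos (by omega)
    rw [h2]; omega
  · omega

-- ===== PORT B =====
-- the while-loop of Source B, state (ra, rb, ba, bb, power); Source B's explicit
-- 'raise ValueError' on power < 0 has no value — those inputs are outside
-- Pre_polypow, and here the loop simply stops (its guard is 'power > 0').
def polypowLoop (mod ra rb ba bb power : Int) : Int × Int :=
  if power ≤ 0 then (ra, rb)
  else
    let r' : Int × Int :=
      if PySem.Int.mod power 2 = 1 then
        (PySem.Int.mod (ra * ba) mod, PySem.Int.mod (ra * bb + rb) mod)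
      else (ra, rb)
    polypowLoop mod r'.1 r'.2 (PySem.Int.mod (ba * ba) mod)
      (PySem.Int.mod (ba * bb + bb) mod) (PySem.Int.floordiv power 2)
termination_by power.toNat
decreasing_by
  have h2 : PySem.Int.floordiv power 2 = power / 2 :=
    PySem.Int.floordiv_eq_ediv_of_pos (by omega)
  rw [h2]; omega

def polypow_alt (a : Int) (b : Int) (power : Int) (mod : Int) : Int × Int :=
  polypowLoop mod 1 0 a b power

-- ===== PRECONDITION & SPEC =====
-- Pre_ excludes exactly the inputs on which Python A raises: power < 0
-- (RecursionError; B raises ValueError there) and, when recursion actually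
-- happens (power ≠ 0), mod = 0 (ZeroDivisionError in both). On power = 0
-- both return (1, 0) for every mod.
def Pre_polypow (a : Int) (b : Int) (power : Int) (mod : Int) : Prop :=
  0 ≤ power ∧ (power = 0 ∨ mod ≠ 0)
instance (a : Int) (b : Int) (power : Int) (mod : Int) : Decidable (Pre_polypow a b power mod) := by unfold Pre_polypow; infer_instance
def pvWitness_polypow : Int × Int × Int × Int := (3, 5, 11, 7)

def Spec_polypow (a : Int) (b : Int) (power : Int) (mod : Int) (out : Int × Int) : Prop := out = polypow_alt a b power mod
instance (a : Int) (b : Int) (power : Int) (mod : Int) (out : Int × Int) : Decidable (Spec_polypow a b power mod out) := by unfold Spec_polypow; infer_instance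

-- ===== CLAIM (what is proved, stated in full; the proofs are below) =====
def Claim_equal_polypow : Prop := ∀ (a : Int) (b : Int) (power : Int) (mod : Int), Dom_polypow a b power mod → Pre_polypow a b power mod → Spec_polypow a b power mod (polypow a b power mod)

-- ===== LEMMAS AND PROOFS =====

-- Exact (un-reduced) composition of linear polynomials: cmul p q = p ∘ q.
def cmul (p q : Int × Int) : Int × Int := (p.1 * q.1, p.1 * q.2 + p.2)

-- Exact n-th compositional power.
def cpow (p : Int × Int) : Nat → Int × Int
  | 0 => (1, 0)
  | n + 1 => cmul p (cpow p n)

-- Reduce both coefficients with Python's mod.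
def red (m : Int) (p : Int × Int) : Int × Int :=
  (PySem.Int.mod p.1 m, PySem.Int.mod p.2 m)

-- Componentwise congruence mod m.
def Cong (m : Int) (p q : Int × Int) : Prop :=
  p.1 ≡ q.1 [ZMOD m] ∧ p.2 ≡ q.2 [ZMOD m]

theorem pymod_modEq (m x : Int) : PySem.Int.mod x m ≡ x [ZMOD m] := by
  rw [Int.modEq_iff_dvd]
  have h := PySem.Int.floordiv_mul_add_mod x m
  exact ⟨PySem.Int.floordiv x m, by linarith⟩

theorem pymod_eq_of_modEq {m x y : Int} (hm : m ≠ 0) (h : x ≡ y [ZMOD m]) :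
    PySem.Int.mod x m = PySem.Int.mod y m := by
  have hd : m ∣ (PySem.Int.mod y m - PySem.Int.mod x m) :=
    (((pymod_modEq m x).trans h).trans (pymod_modEq m y).symm).dvd
  have hz : PySem.Int.mod y m - PySem.Int.mod x m = 0 := by
    apply Int.eq_zero_of_abs_lt_dvd ((abs_dvd m _).mpr hd)
    rw [abs_lt]
    rcases lt_or_gt_of_ne hm with hneg | hpos
    · have b1 := PySem.Int.mod_neg_bounds (a := x) hneg
      have b2 := PySem.Int.mod_neg_bounds (a := y) hneg
      have habs : |m| = -m := abs_of_neg hneg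
      rw [habs]; omega
    · have b1 := PySem.Int.mod_nonneg (a := x) hpos
      have b2 := PySem.Int.mod_lt (a := x) hpos
      have b3 := PySem.Int.mod_nonneg (a := y) hpos
      have b4 := PySem.Int.mod_lt (a := y) hpos
      have habs : |m| = m := abs_of_pos hpos
      rw [habs]; omega
  omega

theorem cong_refl (m : Int) (p : Int × Int) : Cong m p p := ⟨Int.ModEq.refl _, Int.ModEq.refl _⟩

theorem cmul_cong {m : Int} {p p' q q' : Int × Int}
    (hp : Cong m p p') (hq : Cong m q q') : Cong m (cmul p q) (cmul p' q') :=
  ⟨hp.1.mul hq.1, (hp.1.mul hq.2).add hp.2⟩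

theorem red_cong (m : Int) (p : Int × Int) : Cong m (red m p) p :=
  ⟨pymod_modEq m p.1, pymod_modEq m p.2⟩

theorem cpow_cong {m : Int} {p q : Int × Int} (h : Cong m p q) (n : Nat) :
    Cong m (cpow p n) (cpow q n) := by
  induction n with
  | zero => exact cong_refl m _
  | succ k ih => exact cmul_cong h ih

theorem red_eq_of_cong {m : Int} (hm : m ≠ 0) {p q : Int × Int} (h : Cong m p q) :
    red m p = red m q := by
  simp [red, pymod_eq_of_modEq hm h.1, pymod_eq_of_modEq hm h.2]

theorem cmul_assoc (p q r : Int × Int) : cmul (cmul p q) r = cmul p (cmul q r) := by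
  simp [cmul]; ring_nf; simp

theorem cmul_one (p : Int × Int) : cmul p (1, 0) = p := by simp [cmul]

theorem one_cmul (q : Int × Int) : cmul (1, 0) q = q := by simp [cmul]

theorem cpow_one (p : Int × Int) : cpow p 1 = p := by simp [cpow, cmul]

theorem cpow_add (p : Int × Int) (i j : Nat) :
    cpow p (i + j) = cmul (cpow p i) (cpow p j) := by
  induction i with
  | zero => simp [cpow, one_cmul]
  | succ k ih => rw [Nat.succ_add, cpow, ih, cpow, cmul_assoc]

theorem cpow_two (p : Int × Int) : cpow p 2 = cmul p p := by
  have h : (2 : Nat) = 0 + 1 + 1 := rfl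
  rw [h, cpow, cpow, cpow, cmul_one]

theorem cpow_sq (p : Int × Int) (k : Nat) :
    cpow (cmul p p) k = cpow p (2 * k) := by
  induction k with
  | zero => rfl
  | succ i ih =>
      have h2 : 2 * (i + 1) = 2 + 2 * i := by ring
      rw [cpow, ih, h2, cpow_add, cpow_two]

-- res ∘ base composed with (base ∘ base)^k is res ∘ base^(2k+1)
theorem odd_rearrange (r p : Int × Int) (k : Nat) :
    cmul (cmul r p) (cpow (cmul p p) k) = cmul r (cpow p (2 * k + 1)) := by
  rw [cpow_sq, cmul_assoc]
  rfl

-- Characterisation of port A for positive exponents.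
theorem polypow_char (m : Int) (hm : m ≠ 0) :
    ∀ (n : Nat), 1 ≤ n → ∀ (a b : Int), polypow a b (n : Int) m = red m (cpow (a, b) n) := by
  intro n
  induction n using Nat.strong_induction_on with
  | _ n ih =>
    intro h1 a b
    rw [polypow]
    rw [if_neg (by omega : ¬ ((n : Int) ≤ 0))]
    have hmod : PySem.Int.mod (n : Int) 2 = ((n % 2 : Nat) : Int) :=
      PySem.Int.mod_natCast n 2
    by_cases he : n % 2 = 0
    · rw [if_pos (by rw [hmod, he]; rfl)]
      have hfd : PySem.Int.floordiv (n : Int) 2 = ((n / 2 : Nat) : Int) :=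
        PySem.Int.floordiv_natCast n 2
      rw [hfd, ih (n / 2) (by omega) (by omega)]
      apply red_eq_of_cong hm
      have hc : Cong m ((PySem.Int.mod (a * a) m, PySem.Int.mod (a * b + b) m))
          (cmul (a, b) (a, b)) := ⟨pymod_modEq m (a * a), pymod_modEq m (a * b + b)⟩
      have h2 := cpow_cong hc (n / 2)
      rw [cpow_sq] at h2
      have h2k : 2 * (n / 2) = n := by omega
      rw [h2k] at h2
      exact h2
    · rw [if_neg (by rw [hmod]; omega)]
      have hsub : (n : Int) - 1 = ((n - 1 : Nat) : Int) := by omega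
      rw [hsub]
      by_cases h2 : n = 1
      · subst h2
        rw [polypow]
        simp [red, cpow, cmul]
      · rw [ih (n - 1) (by omega) (by omega)]
        have hn : n = (n - 1) + 1 := by omega
        conv_rhs => rw [hn]
        exact red_eq_of_cong hm
          (cmul_cong (cong_refl m (a, b)) (red_cong m (cpow (a, b) (n - 1))))

-- Characterisation of B's loop for positive exponents.
theorem polypowLoop_char (m : Int) (hm : m ≠ 0) :
    ∀ (n : Nat), 1 ≤ n → ∀ (ra rb ba bb : Int),
      polypowLoop m ra rb ba bb (n : Int) = red m (cmul (ra, rb) (cpow (ba, bb) n)) := by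
  intro n
  induction n using Nat.strong_induction_on with
  | _ n ih =>
    intro h1 ra rb ba bb
    rw [polypowLoop]
    rw [if_neg (by omega : ¬ ((n : Int) ≤ 0))]
    have hmod : PySem.Int.mod (n : Int) 2 = ((n % 2 : Nat) : Int) :=
      PySem.Int.mod_natCast n 2
    have hfd : PySem.Int.floordiv (n : Int) 2 = ((n / 2 : Nat) : Int) :=
      PySem.Int.floordiv_natCast n 2
    -- the squared base is congruent to base ∘ base
    have hbase : Cong m ((PySem.Int.mod (ba * ba) m, PySem.Int.mod (ba * bb + bb) m))
        (cmul (ba, bb) (ba, bb)) := ⟨pymod_modEq m (ba * ba), pymod_modEq m (ba * bb + bb)⟩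
    by_cases h2 : n = 1
    · subst h2
      rw [if_pos (by rw [hmod]; rfl)]
      simp only [hfd]
      rw [polypowLoop]
      rw [if_pos (by norm_num)]
      rw [cpow_one]
      rfl
    · -- n ≥ 2, so n / 2 ≥ 1 and the loop recurses with the IH applicable
      have hk1 : 1 ≤ n / 2 := by omega
      have hklt : n / 2 < n := by omega
      by_cases hb : n % 2 = 1
      · rw [if_pos (by rw [hmod, hb]; rfl)]
        simp only [hfd]
        rw [ih (n / 2) hklt hk1]
        apply red_eq_of_cong hm
        have hres : Cong m ((PySem.Int.mod (ra * ba) m, PySem.Int.mod (ra * bb + rb) m))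
            (cmul (ra, rb) (ba, bb)) := ⟨pymod_modEq m (ra * ba), pymod_modEq m (ra * bb + rb)⟩
        have h3 := cmul_cong hres (cpow_cong hbase (n / 2))
        rw [odd_rearrange] at h3
        have hsum : 2 * (n / 2) + 1 = n := by omega
        rw [hsum] at h3
        exact h3
      · rw [if_neg (by rw [hmod]; omega)]
        simp only [hfd]
        rw [ih (n / 2) hklt hk1]
        apply red_eq_of_cong hm
        have h3 := cmul_cong (cong_refl m (ra, rb)) (cpow_cong hbase (n / 2))
        rw [cpow_sq] at h3
        have hsum : 2 * (n / 2) = n := by omega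
        rw [hsum] at h3
        exact h3

-- ===== VERDICT (by name: the statement is the Claim_ definition above) =====
theorem polypow_spec : Claim_equal_polypow := by
  intro a b power mod _ hpre
  unfold Spec_polypow polypow_alt
  obtain ⟨hp, hpm⟩ := hpre
  by_cases h0 : power = 0
  · subst h0
    rw [polypow, polypowLoop]
    norm_num
  · have hm : mod ≠ 0 := by rcases hpm with h | h; exact absurd h h0; exact h
    have hn : power = ((power.toNat : Nat) : Int) := by omega
    rw [hn, polypow_char mod hm power.toNat (by omega),
      polypowLoop_char mod hm power.toNat (by omega), one_cmul]
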